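-- pv_equiv track=rewrite | github.com/shriyans-h/ee1030-2025 | EE25BTECH11041/Assignments/matgeo/q13-5.13.66/c/code/figure.py | solve_part_c
-- ===== SOURCE A (Python) =====
-- def solve_part_c(p):
--     """
--     Solves part (c) by checking every matrix of the form [[a, b], [c, a]].
--
--     It counts matrices where:
--     1. The determinant (a^2 - bc) is NOT divisible by p.
--
--     Args:
--         p: An odd prime number.
--
--     Returns:
--         The total count of such matrices.
--     """
--     count = 0
--     # Iterate through all possible values for a, b, and c
--     for a in range(p):
--         for b in range(p):
--             for c in range(p):
--                 # Determinant condition: a^2 - bc != 0 mod p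
--                 determinant_is_not_zero = (a * a - b * c) % p != 0
--
--                 if determinant_is_not_zero:
--                     count += 1
--     return count
-- ===== SOURCE B (Python) =====
-- def solve_part_c(p):
--     # Count pairs (b, c) indirectly: tally how many a give each square residue,
--     # then subtract the singular count from the total p^3.  O(p^2) instead of O(p^3).
--     if p <= 0:
--         return 0
--     sq = {}
--     for a in range(p):
--         r = (a * a) % p
--         sq[r] = sq.get(r, 0) + 1
--     zeros = 0
--     for b in range(p):
--         for c in range(p):
--             zeros += sq.get((b * c) % p, 0)
--     return p * p * p - zeros
-- ===== Notes on version B (the rewrite author's own statement) =====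
-- stated objective: faster
-- what changed: Instead of testing every triple (a,b,c), B tallies the square residues a^2 mod p in a dictionary in one O(p) pass, then counts singular matrices by summing the tally over all products b*c in one O(p^2) double loop and subtracts from p^3.
import Mathlib
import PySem

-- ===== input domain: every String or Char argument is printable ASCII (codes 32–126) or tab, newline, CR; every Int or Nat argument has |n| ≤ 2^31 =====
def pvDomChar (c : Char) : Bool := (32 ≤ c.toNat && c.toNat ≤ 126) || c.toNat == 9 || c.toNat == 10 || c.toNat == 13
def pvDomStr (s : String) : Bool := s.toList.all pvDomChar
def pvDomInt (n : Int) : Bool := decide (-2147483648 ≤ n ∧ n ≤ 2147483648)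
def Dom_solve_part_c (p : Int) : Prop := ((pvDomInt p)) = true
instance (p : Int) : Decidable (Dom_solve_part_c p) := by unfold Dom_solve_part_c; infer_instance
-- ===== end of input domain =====

-- B replaces A's O(p^3) triple loop by an O(p^2) tally of square residues: faster (asymptotic).


-- ===== PORT A =====
def solve_part_c (p : Int) : Int :=
  (PySem.List.pyRange 0 p 1).foldl (fun count a =>
    (PySem.List.pyRange 0 p 1).foldl (fun count b =>
      (PySem.List.pyRange 0 p 1).foldl (fun count c =>
        if PySem.Int.mod (a * a - b * c) p ≠ 0 then count + 1 else count)
        count) count) 0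

-- ===== PORT B =====
def solve_part_c_alt (p : Int) : Int :=
  if p ≤ 0 then 0
  else
    let sq : PySem.Dict Int Int :=
      (PySem.List.pyRange 0 p 1).foldl
        (fun d a => d.modify (PySem.Int.mod (a * a) p) 0 (· + 1)) PySem.Dict.empty
    let zeros : Int :=
      (PySem.List.pyRange 0 p 1).foldl (fun z b =>
        (PySem.List.pyRange 0 p 1).foldl (fun z c =>
          z + sq.getD (PySem.Int.mod (b * c) p) 0) z) 0
    p * p * p - zeros

-- ===== PRECONDITION & SPEC =====
def Spec_solve_part_c (p : Int) (out : Int) : Prop := out = solve_part_c_alt p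
instance (p : Int) (out : Int) : Decidable (Spec_solve_part_c p out) := by unfold Spec_solve_part_c; infer_instance

-- ===== CLAIM (what is proved, stated in full; the proofs are below) =====
def Claim_equal_solve_part_c : Prop := ∀ (p : Int), Dom_solve_part_c p → Spec_solve_part_c p (solve_part_c p)

-- ===== LEMMAS AND PROOFS =====

-- 0/1 indicator of "a*a and b*c share the same residue mod p"
def pvChi (p b c a : Int) : Int :=
  if PySem.Int.mod (a * a) p = PySem.Int.mod (b * c) p then 1 else 0

theorem pv_sum_swap {α β : Type} (l : List α) (m : List β) (f : α → β → Int) :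
    (l.map (fun x => (m.map (f x)).sum)).sum
      = (m.map (fun y => (l.map (fun x => f x y)).sum)).sum := by
  induction l with
  | nil => simp
  | cons a t ih =>
      simp only [List.map_cons, List.sum_cons, ih, ← PySem.List.sum_map_add_int]

theorem pv_sum_map_sub_int {α : Type} (xs : List α) (f g : α → Int) :
    (xs.map (fun x => f x - g x)).sum = (xs.map f).sum - (xs.map g).sum := by
  have h := PySem.List.sum_map_add_int xs (fun x => f x - g x) g
  simp only [sub_add_cancel] at h
  linarith [h]

theorem pv_foldl_if_prop {α : Type} (P : α → Prop) [DecidablePred P] (l : List α) (init : Int) :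
    l.foldl (fun acc x => if P x then acc + 1 else acc) init
      = init + (l.map (fun x => if P x then (1 : Int) else 0)).sum := by
  have h1 := PySem.List.foldl_count_if (fun x => decide (P x)) l init
  simp only [decide_eq_true_eq] at h1
  have h2 := PySem.List.sum_map_ite_one_zero (fun x => decide (P x)) l
  simp only [decide_eq_true_eq] at h2
  rw [h1, ← h2]

theorem pv_cond_iff {p : Int} (hp : 0 < p) (a b c : Int) :
    PySem.Int.mod (a * a - b * c) p = 0 ↔
      PySem.Int.mod (a * a) p = PySem.Int.mod (b * c) p := by
  rw [PySem.Int.mod_eq_zero_iff_dvd, PySem.Int.mod_eq_emod_of_pos hp,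
    PySem.Int.mod_eq_emod_of_pos hp]
  constructor
  · intro h
    have := (Int.modEq_iff_dvd (n := p) (a := b * c) (b := a * a)).2 h
    exact this.symm
  · intro h
    exact (Int.modEq_iff_dvd (n := p) (a := b * c) (b := a * a)).1 (Int.ModEq.symm h)

theorem pv_ite_ne {p : Int} (hp : 0 < p) (a b c : Int) :
    (if PySem.Int.mod (a * a - b * c) p ≠ 0 then (1 : Int) else 0)
      = 1 - pvChi p b c a := by
  unfold pvChi
  by_cases h : PySem.Int.mod (a * a) p = PySem.Int.mod (b * c) p
  · simp [h, (pv_cond_iff hp a b c).2 h]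
  · rw [if_pos (show PySem.Int.mod (a * a - b * c) p ≠ 0 from
        fun h0 => h ((pv_cond_iff hp a b c).1 h0))]
    simp [h]

theorem pv_A_form {p : Int} (hp : 0 < p) :
    solve_part_c p
      = ((PySem.List.pyRange 0 p 1).map (fun a =>
          ((PySem.List.pyRange 0 p 1).map (fun b =>
            ((PySem.List.pyRange 0 p 1).map (fun c =>
              (1 : Int) - pvChi p b c a)).sum)).sum)).sum := by
  unfold solve_part_c
  simp only [pv_foldl_if_prop, PySem.List.foldl_add, zero_add, pv_ite_ne hp]

theorem pv_B_form {p : Int} (hp : 0 < p) :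
    solve_part_c_alt p
      = p * p * p - ((PySem.List.pyRange 0 p 1).map (fun b =>
          ((PySem.List.pyRange 0 p 1).map (fun c =>
            ((PySem.List.pyRange 0 p 1).map (fun a => pvChi p b c a)).sum)).sum)).sum := by
  unfold solve_part_c_alt
  rw [if_neg (not_le.mpr hp)]
  have hsq : ∀ v : Int,
      (((PySem.List.pyRange 0 p 1).foldl
          (fun d a => d.modify (PySem.Int.mod (a * a) p) 0 (· + 1))
          PySem.Dict.empty).getD v 0)
        = ((PySem.List.pyRange 0 p 1).map
            (fun a => if PySem.Int.mod (a * a) p = v then (1 : Int) else 0)).sum := by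
    intro v
    have hmf := List.foldl_map
      (f := fun a : Int => PySem.Int.mod (a * a) p)
      (g := fun (d : PySem.Dict Int Int) (x : Int) => d.modify x 0 (· + 1))
      (l := PySem.List.pyRange 0 p 1) (init := PySem.Dict.empty)
    rw [← hmf, PySem.Dict.getD_foldl_modify_add_one, PySem.Dict.getD_empty, zero_add,
      List.count, List.countP_map,
      ← PySem.List.sum_map_ite_one_zero ((fun x => x == v) ∘ fun a => PySem.Int.mod (a * a) p)]
    simp only [Function.comp_apply, beq_iff_eq]
  simp only [hsq, PySem.List.foldl_add, zero_add]
  unfold pvChi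
  rfl

theorem pv_main {p : Int} (hp : 0 < p) : solve_part_c p = solve_part_c_alt p := by
  rw [pv_A_form hp, pv_B_form hp]
  have hlen : (((PySem.List.pyRange 0 p 1).length : Nat) : Int) = p := by
    rw [PySem.List.length_pyRange_one]
    omega
  have hswap :
      ((PySem.List.pyRange 0 p 1).map (fun a =>
        ((PySem.List.pyRange 0 p 1).map (fun b =>
          ((PySem.List.pyRange 0 p 1).map (fun c => pvChi p b c a)).sum)).sum)).sum
      = ((PySem.List.pyRange 0 p 1).map (fun b =>
          ((PySem.List.pyRange 0 p 1).map (fun c =>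
            ((PySem.List.pyRange 0 p 1).map (fun a => pvChi p b c a)).sum)).sum)).sum := by
    rw [pv_sum_swap]
    refine congrArg List.sum (List.map_congr_left fun b _ => ?_)
    exact pv_sum_swap _ _ (fun a c => pvChi p b c a)
  simp only [pv_sum_map_sub_int, PySem.List.sum_map_const_int]
  rw [hswap, hlen]
  ring

-- ===== VERDICT (by name: the statement is the Claim_ definition above) =====
theorem solve_part_c_spec : Claim_equal_solve_part_c := by
  intro p _
  unfold Spec_solve_part_c
  by_cases hp : 0 < p
  · exact pv_main hp
  · have hle : p ≤ 0 := by omega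
    unfold solve_part_c solve_part_c_alt
    rw [PySem.List.pyRange_one_eq_nil hle, if_pos hle]
    rfl
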